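-- pv_equiv track=rewrite | github.com/heineman/LearningAlgorithms | ch07/challenge.py | path_to_recursive
-- ===== SOURCE A (Python) =====
-- def path_to_recursive(node_from, src, target):
--     """
--     Recursive implementation, which appears similar in logic to a pre-order
--     search. First yield the path before me, then yield self.
--     """
--     if target == src:
--         yield src
--     else:
--         if target not in node_from:
--             raise ValueError('{} is unreachable from {}'.format(target,src))
--
--         for n in path_to_recursive(node_from, src, node_from[target]):
--             yield n
--         yield target
-- ===== SOURCE B (Python) =====
-- def path_to_recursive(node_from, src, target):
--     """Two-pass re-implementation: first walk the parent pointers from target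
--     to src only counting the steps, then preallocate the output list and fill
--     it back-to-front in a second walk; finally yield it src-first."""
--     # pass 1: distance from target to src
--     k = 0
--     cur = target
--     while cur != src:
--         if cur not in node_from:
--             raise ValueError('{} is unreachable from {}'.format(cur, src))
--         cur = node_from[cur]
--         k += 1
--     # pass 2: fill positions k .. 1 walking up from target; position 0 is src
--     out = [src] * (k + 1)
--     cur = target
--     for i in range(k, 0, -1):
--         out[i] = cur
--         cur = node_from[cur]
--     yield from out
-- ===== Notes on version B (the rewrite author's own statement) =====
-- stated objective: faster
-- what changed: Replaces the nested recursive generators (each yielded item is re-yielded through every enclosing frame) by two flat passes: one that counts the distance from target to src, and one that fills a preallocated output list back-to-front; no recursion, no per-level generator delegation.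
-- outside the precondition, e.g. on path_to_recursive({2: 3}, 1, 2): A raises ValueError, B raises ValueError
import Mathlib
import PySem

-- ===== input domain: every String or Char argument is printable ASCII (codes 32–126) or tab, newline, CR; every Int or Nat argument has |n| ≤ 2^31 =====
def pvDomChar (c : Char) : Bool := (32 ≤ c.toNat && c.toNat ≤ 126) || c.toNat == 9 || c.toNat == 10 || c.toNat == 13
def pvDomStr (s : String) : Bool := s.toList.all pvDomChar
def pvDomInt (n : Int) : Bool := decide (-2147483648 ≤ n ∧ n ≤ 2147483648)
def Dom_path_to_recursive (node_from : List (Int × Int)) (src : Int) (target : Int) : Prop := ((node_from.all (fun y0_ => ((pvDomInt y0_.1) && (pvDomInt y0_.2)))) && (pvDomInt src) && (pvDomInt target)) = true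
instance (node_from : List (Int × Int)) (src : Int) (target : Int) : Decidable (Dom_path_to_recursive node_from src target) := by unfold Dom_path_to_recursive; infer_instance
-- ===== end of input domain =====

-- B replaces A's nested recursive generators by two flat passes (count the distance,
-- then fill a preallocated list back-to-front); return values are proved equal on Pre_.

-- ===== PORT A =====
-- A is a recursive generator; its list of yielded values is ported with a fuel counter
-- (node_from.length + 1 recursion levels always suffice inside Pre_; fuel only makes the
-- same recursion total, it never changes the value on Pre_).
def pathARec (fuel : Nat) (node_from : List (Int × Int)) (src : Int) (target : Int) : List Int :=
  match fuel with
  | 0 => []                                   -- never reached inside Pre_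
  | n + 1 =>
    if target = src then [src]
    else
      match node_from.lookup target with      -- dict lookup: first match
      | none => []                            -- Python raises ValueError here (outside Pre_)
      | some p => pathARec n node_from src p ++ [target]

def path_to_recursive (node_from : List (Int × Int)) (src : Int) (target : Int) : List Int :=
  pathARec (node_from.length + 1) node_from src target

-- ===== PORT B =====
-- pass 1: count the steps from target up to src (the while-loop `k += 1`), with the same
-- fuel guard for totality only; none = the Python raised (outside Pre_).
def pathBDepth (fuel : Nat) (node_from : List (Int × Int)) (src : Int) (cur : Int) : Option Nat :=
  match fuel with
  | 0 => none                                 -- never reached inside Pre_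
  | n + 1 =>
    if cur = src then some 0
    else
      match node_from.lookup cur with
      | none => none                          -- Python raises ValueError here (outside Pre_)
      | some p => (pathBDepth n node_from src p).map (· + 1)

-- pass 2: `for i in range(k, 0, -1): out[i] = cur; cur = node_from[cur]` — writing the
-- preallocated slots k, k-1, …, 1 back-to-front is building the tail by consing cur.
def pathBFill (k : Nat) (node_from : List (Int × Int)) (cur : Int) (out : List Int) : List Int :=
  match k with
  | 0 => out
  | i + 1 =>
    match node_from.lookup cur with
    | none => out                             -- unreachable: pass 1 already looked cur up
    | some p => pathBFill i node_from p (cur :: out)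

def path_to_recursive_alt (node_from : List (Int × Int)) (src : Int) (target : Int) : List Int :=
  match pathBDepth (node_from.length + 1) node_from src target with
  | none => []                                -- Python raises ValueError here (outside Pre_)
  | some k => src :: pathBFill k node_from target []   -- out[0] = src stays from the preallocation

-- ===== PRECONDITION & SPEC =====
-- k-fold parent-pointer lookup from a node (used only to state reachability in Pre_).
def parentIter (node_from : List (Int × Int)) : Nat → Int → Option Int
  | 0, t => some t
  | n + 1, t => (node_from.lookup t).bind (parentIter node_from n)

-- Pre_ excludes exactly the inputs on which the Python A raises (ValueError when target is
-- unreachable from src, RecursionError on a cyclic parent chain): src must be reachable from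
-- target by following parent pointers, necessarily within node_from.length steps.
def Pre_path_to_recursive (node_from : List (Int × Int)) (src : Int) (target : Int) : Prop :=
  ∃ n ≤ node_from.length, parentIter node_from n target = some src

instance (node_from : List (Int × Int)) (src : Int) (target : Int) : Decidable (Pre_path_to_recursive node_from src target) := by unfold Pre_path_to_recursive; infer_instance

def pvWitness_path_to_recursive : (List (Int × Int)) × Int × Int := ([(2, 1), (3, 2), (4, 3)], 1, 4)

def Spec_path_to_recursive (node_from : List (Int × Int)) (src : Int) (target : Int) (out : List Int) : Prop := out = path_to_recursive_alt node_from src target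
instance (node_from : List (Int × Int)) (src : Int) (target : Int) (out : List Int) : Decidable (Spec_path_to_recursive node_from src target out) := by unfold Spec_path_to_recursive; infer_instance

-- ===== CLAIM (what is proved, stated in full; the proofs are below) =====
def Claim_equal_path_to_recursive : Prop := ∀ (node_from : List (Int × Int)) (src : Int) (target : Int), Dom_path_to_recursive node_from src target → Pre_path_to_recursive node_from src target → Spec_path_to_recursive node_from src target (path_to_recursive node_from src target)

-- ===== LEMMAS AND PROOFS =====

-- If pass 1 finds a distance k, A's recursion with the same fuel is src followed by the fill.
theorem pathARec_eq_fill (node_from : List (Int × Int)) (src : Int) :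
    ∀ (fuel : Nat) (t : Int) (k : Nat) (acc : List Int),
      pathBDepth fuel node_from src t = some k →
      pathARec fuel node_from src t ++ acc = src :: pathBFill k node_from t acc := by
  intro fuel
  induction fuel with
  | zero => intro t k acc h; simp [pathBDepth] at h
  | succ n ih =>
    intro t k acc h
    simp only [pathBDepth, pathARec] at *
    by_cases ht : t = src
    · simp [ht] at h ⊢
      subst h; simp [pathBFill]
    · simp only [if_neg ht] at h ⊢
      cases hl : node_from.lookup t with
      | none => rw [hl] at h; simp at h
      | some p =>
        rw [hl] at h; simp only [] at h
        cases hd : pathBDepth n node_from src p with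
        | none => simp [hd] at h
        | some k' =>
          simp [hd] at h
          subst h
          simp only [pathBFill, hl, List.append_assoc, List.cons_append, List.nil_append]
          exact ih p k' (t :: acc) hd

-- Reachability within n steps (n < fuel) makes pass 1 succeed.
theorem depth_of_parentIter (node_from : List (Int × Int)) (src : Int) :
    ∀ (n : Nat) (t : Int) (fuel : Nat), parentIter node_from n t = some src → n < fuel →
      ∃ k, pathBDepth fuel node_from src t = some k := by
  intro n
  induction n with
  | zero =>
    intro t fuel h hf
    simp [parentIter] at h
    cases fuel with
    | zero => omega
    | succ m => exact ⟨0, by simp [pathBDepth, h]⟩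
  | succ n ih =>
    intro t fuel h hf
    cases fuel with
    | zero => omega
    | succ m => ?_
    by_cases ht : t = src
    · exact ⟨0, by simp [pathBDepth, ht]⟩
    · simp only [parentIter] at h
      cases hl : node_from.lookup t with
      | none => rw [hl] at h; simp at h
      | some p =>
        rw [hl] at h; simp at h
        obtain ⟨k, hk⟩ := ih p m h (Nat.lt_of_succ_lt_succ hf)
        exact ⟨k + 1, by simp [pathBDepth, ht, hl, hk]⟩

-- ===== VERDICT (by name: the statement is the Claim_ definition above) =====
theorem path_to_recursive_spec : Claim_equal_path_to_recursive := by
  intro node_from src target _ hpre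
  obtain ⟨n, hn, hreach⟩ := hpre
  obtain ⟨k, hk⟩ := depth_of_parentIter node_from src n target (node_from.length + 1) hreach (Nat.lt_succ_of_le hn)
  unfold Spec_path_to_recursive path_to_recursive path_to_recursive_alt
  rw [hk]
  have := pathARec_eq_fill node_from src (node_from.length + 1) target k [] hk
  simpa using this
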